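-- pv_equiv track=rewrite | github.com/emgould/redis-search | src/utils/soft_comparison.py | _match_person_word_sequence
-- ===== SOURCE A (Python) =====
-- def _match_person_word_sequence(query_words: list[str], name_words: list[str]) -> bool:
--     if not query_words:
--         return True
--     if not name_words:
--         return False
--
--     for start_idx in range(len(name_words)):
--         if _try_match_person_from(query_words, name_words, start_idx):
--             return True
--
--     return False
--
-- def _try_match_person_from(
--     query_words: list[str], name_words: list[str], start_idx: int
-- ) -> bool:
--     name_idx = start_idx
--     query_len = len(query_words)
--
--     for i, query_word in enumerate(query_words):
--         is_last_word = i == query_len - 1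
--         found_match = False
--
--         while name_idx < len(name_words):
--             name_word = name_words[name_idx]
--             if is_last_word:
--                 if name_word.startswith(query_word):
--                     found_match = True
--                     break
--             else:
--                 if query_word == name_word:
--                     found_match = True
--                     break
--             name_idx += 1
--
--         if not found_match:
--             return False
--
--         name_idx += 1
--
--     return True
-- ===== SOURCE B (Python) =====
-- def _match_person_word_sequence(query_words: list[str], name_words: list[str]) -> bool:
--     if not query_words:
--         return True
--     *init, last = query_words
--     it = iter(name_words)
--     for q in init:
--         for n in it:
--             if n == q:
--                 break
--         else:
--             return False
--     return any(n.startswith(last) for n in it)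
-- ===== Notes on version B (the rewrite author's own statement) =====
-- stated objective: faster
-- what changed: Replaced A's outer loop that retries the subsequence match from every start index (each retry rescanning name_words) by a single greedy left-to-right scan from index 0, which suffices because a greedy match from the start exists whenever a match from any start index does.
import Mathlib
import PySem

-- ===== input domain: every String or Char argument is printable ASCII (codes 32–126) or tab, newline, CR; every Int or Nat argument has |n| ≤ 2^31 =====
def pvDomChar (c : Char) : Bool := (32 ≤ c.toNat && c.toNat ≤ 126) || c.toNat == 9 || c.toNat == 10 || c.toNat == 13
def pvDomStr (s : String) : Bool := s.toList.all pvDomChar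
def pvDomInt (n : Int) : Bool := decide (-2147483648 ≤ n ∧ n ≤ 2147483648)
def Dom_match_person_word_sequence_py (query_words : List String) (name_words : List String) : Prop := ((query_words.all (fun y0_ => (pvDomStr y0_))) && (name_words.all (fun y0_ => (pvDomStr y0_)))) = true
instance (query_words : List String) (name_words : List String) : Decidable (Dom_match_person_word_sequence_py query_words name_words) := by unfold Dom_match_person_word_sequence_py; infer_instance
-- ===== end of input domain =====

-- B replaces A's outer loop over every start index by one greedy left-to-right
-- subsequence scan (greedy matching from index 0 already finds a match whenever
-- any start index does), an asymptotic speed-up; exact same return values.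

-- ===== PORT A =====
-- the inner `while name_idx < len(name_words): … name_idx += 1` loop:
-- returns the index at which it breaks (none = loop ran off the end)
def pyWhileA (query_word : String) (isLast : Bool) (ns : List String) (idx : Nat) : Option Nat :=
  if h : idx < ns.length then
    if (if isLast then PySem.Str.startswith ns[idx] query_word else query_word == ns[idx]) then
      some idx
    else
      pyWhileA query_word isLast ns (idx + 1)
  else none
termination_by ns.length - idx

-- the `for i, query_word in enumerate(query_words)` loop of _try_match_person_from
def tryForA (qs : List String) (i : Nat) (qlen : Nat) (ns : List String) (nidx : Nat) : Bool :=
  match qs with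
  | [] => true
  | q :: rest =>
    match pyWhileA q (i == qlen - 1) ns nidx with
    | none => false
    | some j => tryForA rest (i + 1) qlen ns (j + 1)

-- _try_match_person_from
def tryMatchPersonFrom (query_words : List String) (name_words : List String) (start_idx : Nat) : Bool :=
  tryForA query_words 0 query_words.length name_words start_idx

def match_person_word_sequence_py (query_words : List String) (name_words : List String) : Bool :=
  if query_words.isEmpty then true
  else if name_words.isEmpty then false
  else (List.range name_words.length).any (fun s => tryMatchPersonFrom query_words name_words s)

-- ===== PORT B =====
-- the inner `for n in it: if n == q: break / else: return False` step:
-- consume the iterator up to and including the first element equal to q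
def consumeEq (q : String) : List String → Option (List String)
  | [] => none
  | n :: t => if n == q then some t else consumeEq q t

-- the `for q in init` loop followed by the final `any(...)` over what is left
def altGo : List String → String → List String → Bool
  | [], last, ns => ns.any (fun n => PySem.Str.startswith n last)
  | q :: rest, last, ns =>
    match consumeEq q ns with
    | none => false
    | some ns' => altGo rest last ns'

-- `*init, last = query_words`
def splitLast : List String → Option (List String × String)
  | [] => none
  | [x] => some ([], x)
  | x :: y :: t =>
    match splitLast (y :: t) with
    | some (i, l) => some (x :: i, l)
    | none => none

def match_person_word_sequence_py_alt (query_words : List String) (name_words : List String) : Bool :=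
  match splitLast query_words with
  | none => true
  | some (init, last) => altGo init last name_words

-- ===== PRECONDITION & SPEC =====
def Spec_match_person_word_sequence_py (query_words : List String) (name_words : List String) (out : Bool) : Prop := out = match_person_word_sequence_py_alt query_words name_words
instance (query_words : List String) (name_words : List String) (out : Bool) : Decidable (Spec_match_person_word_sequence_py query_words name_words out) := by unfold Spec_match_person_word_sequence_py; infer_instance

-- ===== CLAIM (what is proved, stated in full; the proofs are below) =====
def Claim_equal_match_person_word_sequence_py : Prop := ∀ (query_words : List String) (name_words : List String), Dom_match_person_word_sequence_py query_words name_words → Spec_match_person_word_sequence_py query_words name_words (match_person_word_sequence_py query_words name_words)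

-- ===== LEMMAS AND PROOFS =====

-- the predicate the inner while loop of A tests
def pvCond (isLast : Bool) (q : String) : String → Bool :=
  fun n => if isLast then PySem.Str.startswith n q else q == n

lemma pyWhileA_eq (q : String) (isLast : Bool) (ns : List String) :
    ∀ idx, pyWhileA q isLast ns idx =
      (List.findIdx? (pvCond isLast q) (ns.drop idx)).map (fun k => idx + k) := by
  have main : ∀ fuel idx, ns.length - idx ≤ fuel →
      pyWhileA q isLast ns idx =
        (List.findIdx? (pvCond isLast q) (ns.drop idx)).map (fun k => idx + k) := by
    intro fuel
    induction fuel with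
    | zero =>
      intro idx hle
      have hlen : ns.length ≤ idx := by omega
      rw [pyWhileA]
      simp [List.drop_eq_nil_of_le hlen, Nat.not_lt.mpr hlen]
    | succ fuel ih =>
      intro idx hle
      by_cases h : idx < ns.length
      · rw [pyWhileA, dif_pos h, ← List.getElem_cons_drop h, List.findIdx?_cons]
        by_cases hc : pvCond isLast q ns[idx] = true
        · rw [if_pos hc, if_pos (show (if isLast then PySem.Str.startswith ns[idx] q else q == ns[idx]) = true from hc)]
          simp
        · rw [if_neg hc, if_neg (show ¬ (if isLast then PySem.Str.startswith ns[idx] q else q == ns[idx]) = true from hc)]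
          rw [ih (idx + 1) (by omega), Option.map_map]
          cases List.findIdx? (pvCond isLast q) (ns.drop (idx + 1)) with
          | none => simp
          | some k => simp [Function.comp]; omega
      · have hlen : ns.length ≤ idx := by omega
        rw [pyWhileA, dif_neg h]
        simp [List.drop_eq_nil_of_le hlen]
  intro idx
  exact main (ns.length - idx) idx le_rfl

lemma consumeEq_eq (q : String) :
    ∀ ns : List String, consumeEq q ns =
      (List.findIdx? (fun n => q == n) ns).map (fun k => ns.drop (k + 1)) := by
  intro ns
  induction ns with
  | nil => simp [consumeEq]
  | cons n t ih =>
    rw [List.findIdx?_cons]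
    by_cases h : n = q
    · simp [consumeEq, h]
    · have h1 : (n == q) = false := by simp [h]
      have h2 : (q == n) = false := by simp [Ne.symm h]
      simp only [consumeEq, h1, if_false, h2, Bool.false_eq_true]
      rw [ih, Option.map_map]
      cases List.findIdx? (fun n => q == n) t with
      | none => simp
      | some k => simp [Function.comp, List.drop_succ_cons]

lemma consumeEq_prefix (q : String) :
    ∀ ns t : List String, consumeEq q ns = some t → ∃ p, p ++ t = ns := by
  intro ns
  induction ns with
  | nil => intro t h; simp [consumeEq] at h
  | cons n ns' ih =>
    intro t h
    by_cases hq : (n == q) = true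
    · simp [consumeEq, hq] at h
      exact ⟨[n], by simp [h]⟩
    · simp [consumeEq, hq] at h
      obtain ⟨p, hp⟩ := ih t h
      exact ⟨n :: p, by simp [hp]⟩

-- greedy monotonicity: a successful scan of a suffix extends to the whole list
lemma altGo_mono : ∀ (init : List String) (last : String) (pre ns' : List String),
    altGo init last ns' = true → altGo init last (pre ++ ns') = true := by
  intro init
  induction init with
  | nil =>
    intro last pre ns' h
    simp only [altGo] at h ⊢
    rw [List.any_append, h, Bool.or_true]
  | cons q rest ih =>
    intro last pre ns' h
    induction pre with
    | nil => simpa using h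
    | cons p pre' ihp =>
      have hrec : altGo (q :: rest) last (pre' ++ ns') = true := ihp
      rw [List.cons_append]
      simp only [altGo, consumeEq] at hrec ⊢
      by_cases hpq : (p == q) = true
      · rw [if_pos hpq]
        cases hcc : consumeEq q (pre' ++ ns') with
        | none => rw [hcc] at hrec; exact absurd hrec (by simp)
        | some u =>
          rw [hcc] at hrec
          obtain ⟨p2, hp2⟩ := consumeEq_prefix q _ _ hcc
          rw [← hp2]
          exact ih last p2 u hrec
      · rw [if_neg hpq]
        exact hrec

lemma altGo_nil (init : List String) (last : String) : altGo init last [] = false := by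
  cases init with
  | nil => simp [altGo]
  | cons q rest => simp [altGo, consumeEq]

lemma splitLast_isSome : ∀ (q : String) (qs : List String), ∃ il, splitLast (q :: qs) = some il := by
  intro q qs
  induction qs generalizing q with
  | nil => exact ⟨([], q), rfl⟩
  | cons y t ih =>
    obtain ⟨⟨i, l⟩, hil⟩ := ih y
    exact ⟨(q :: i, l), by simp [splitLast, hil]⟩

-- the core bridge: A's query-word loop from name index idx equals B's greedy
-- scan of the dropped suffix
lemma tryForA_eq : ∀ (qs init : List String) (last : String) (i qlen : Nat)
    (ns : List String) (idx : Nat),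
    splitLast qs = some (init, last) → i + qs.length = qlen →
    tryForA qs i qlen ns idx = altGo init last (ns.drop idx) := by
  intro qs
  induction qs with
  | nil => intro init last i qlen ns idx h; simp [splitLast] at h
  | cons q rest ih =>
    intro init last i qlen ns idx hsplit hlen
    cases rest with
    | nil =>
      -- last query word: i == qlen - 1 is true, the while loop tests startswith
      simp only [splitLast, Option.some.injEq, Prod.mk.injEq] at hsplit
      obtain ⟨h1, h2⟩ := hsplit
      subst h1
      rw [← h2]
      have hi : (i == qlen - 1) = true := by
        simp only [List.length_cons, List.length_nil] at hlen
        simp only [beq_iff_eq]; omega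
      simp only [tryForA, hi, altGo]
      rw [pyWhileA_eq]
      have hp : pvCond true q = (fun n => PySem.Str.startswith n q) := by
        funext n; simp [pvCond]
      rw [hp]
      cases hf : List.findIdx? (fun n => PySem.Str.startswith n q) (ns.drop idx) with
      | none =>
        simp only [Option.map_none]
        symm
        rw [← List.findIdx?_isSome, hf]
        rfl
      | some k =>
        simp only [Option.map_some]
        symm
        rw [← List.findIdx?_isSome, hf]
        rfl
    | cons y t =>
      -- not the last query word: i == qlen - 1 is false, the loop tests equality
      have hlen2 : (q :: y :: t).length = (y :: t).length + 1 := rfl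
      have hi : (i == qlen - 1) = false := by
        simp only [List.length_cons] at hlen
        simp only [beq_eq_false_iff_ne, ne_eq]
        omega
      simp only [splitLast] at hsplit
      cases hs : splitLast (y :: t) with
      | none => rw [hs] at hsplit; simp at hsplit
      | some il =>
        obtain ⟨i2, l2⟩ := il
        rw [hs] at hsplit
        simp only [Option.some.injEq, Prod.mk.injEq] at hsplit
        obtain ⟨h1, h2⟩ := hsplit
        rw [← h1, ← h2]
        simp only [tryForA, hi, altGo]
        rw [pyWhileA_eq, consumeEq_eq]
        have hpred : pvCond false q = (fun n => q == n) := by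
          funext n; simp [pvCond]
        rw [hpred]
        cases hf : List.findIdx? (fun n => q == n) (ns.drop idx) with
        | none => simp
        | some k =>
          simp only [Option.map_some]
          show tryForA (y :: t) (i + 1) qlen ns (idx + k + 1) =
            altGo i2 l2 (List.drop (k + 1) (List.drop idx ns))
          rw [ih i2 l2 (i + 1) qlen ns (idx + k + 1) hs (by simp at hlen ⊢; omega)]
          rw [List.drop_drop]
          congr 1

-- ===== VERDICT (by name: the statement is the Claim_ definition above) =====
theorem match_person_word_sequence_py_spec : Claim_equal_match_person_word_sequence_py := by
  intro qs ns _
  unfold Spec_match_person_word_sequence_py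
  unfold match_person_word_sequence_py match_person_word_sequence_py_alt
  cases qs with
  | nil => simp [splitLast]
  | cons q rest =>
    obtain ⟨⟨init, last⟩, hsplit⟩ := splitLast_isSome q rest
    rw [hsplit]
    simp only [List.isEmpty_cons, if_false, Bool.false_eq_true]
    cases ns with
    | nil => simp [altGo_nil]
    | cons n t =>
      simp only [List.isEmpty_cons, if_false, Bool.false_eq_true]
      have hbridge : ∀ s, tryMatchPersonFrom (q :: rest) (n :: t) s =
          altGo init last ((n :: t).drop s) := by
        intro s
        exact tryForA_eq (q :: rest) init last 0 (q :: rest).length (n :: t) s hsplit (by simp)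
      by_cases hB : altGo init last (n :: t) = true
      · rw [hB, List.any_eq_true]
        refine ⟨0, by simp, ?_⟩
        rw [hbridge]
        simpa using hB
      · rw [Bool.not_eq_true] at hB
        rw [hB]
        refine List.any_eq_false.mpr ?_
        intro s hs
        rw [hbridge s]
        cases hA : altGo init last (List.drop s (n :: t)) with
        | false => simp
        | true =>
          exfalso
          have htot : altGo init last (n :: t) = true := by
            have hp := List.take_append_drop s (n :: t)
            rw [← hp]
            exact altGo_mono init last _ _ hA
          rw [htot] at hB
          exact Bool.noConfusion hB
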